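-- pv_equiv track=rewrite | github.com/josongsong/semantica-codegraph | src/contexts/code_foundation/infrastructure/ir/external_analyzers/pyright_adapter.py | _split_union_args
-- ===== SOURCE A (Python) =====
-- def _split_union_args(args_str: str) -> list[str]:
--     """Split Union arguments, respecting nested brackets."""
--     result = []
--     current = []
--     depth = 0
--
--     for char in args_str:
--         if char == "[":
--             depth += 1
--             current.append(char)
--         elif char == "]":
--             depth -= 1
--             current.append(char)
--         elif char == "," and depth == 0:
--             result.append("".join(current).strip())
--             current = []
--         else:
--             current.append(char)
--
--     if current:
--         result.append("".join(current).strip())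
--
--     return result
-- ===== SOURCE B (Python) =====
-- def _top_comma_index(s):
--     depth = 0
--     for i, ch in enumerate(s):
--         if ch == "[":
--             depth += 1
--         elif ch == "]":
--             depth -= 1
--         elif ch == "," and depth == 0:
--             return i
--     return None
--
--
-- def _split_union_args(args_str: str) -> list[str]:
--     """Split Union arguments, respecting nested brackets (recursive split at the first top-level comma)."""
--     i = _top_comma_index(args_str)
--     if i is None:
--         return [] if args_str == "" else [args_str.strip()]
--     return [args_str[:i].strip()] + _split_union_args(args_str[i + 1:])
-- ===== Notes on version B (the rewrite author's own statement) =====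
-- stated objective: simpler
-- what changed: Replaces A's single fold carrying a (result, current-buffer, depth) triple by a short recursion: find the index of the first top-level comma, slice the string there, strip the head and recurse on the tail; no character-by-character buffer or result accumulator.
import Mathlib
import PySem

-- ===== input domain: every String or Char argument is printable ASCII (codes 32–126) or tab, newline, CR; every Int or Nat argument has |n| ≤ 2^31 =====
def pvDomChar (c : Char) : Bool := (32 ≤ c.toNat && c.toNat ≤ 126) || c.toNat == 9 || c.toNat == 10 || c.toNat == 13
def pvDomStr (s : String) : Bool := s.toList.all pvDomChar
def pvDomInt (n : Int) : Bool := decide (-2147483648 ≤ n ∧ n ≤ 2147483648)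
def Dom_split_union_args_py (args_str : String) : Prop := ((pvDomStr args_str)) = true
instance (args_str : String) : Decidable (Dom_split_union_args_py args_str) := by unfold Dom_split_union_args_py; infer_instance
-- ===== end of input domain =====

-- B replaces A's fold over a (result, buffer, depth) triple by recursion at the first top-level comma, for simplicity; same return value proved for all strings.

-- ===== PORT A =====
-- one loop step of A: dispatch on the character, updating (result, current, depth)
def stepA (st : List String × List Char × Int) (char : Char) : List String × List Char × Int :=
  match st with
  | (result, current, depth) =>
    if char = '[' then (result, current ++ [char], depth + 1)
    else if char = ']' then (result, current ++ [char], depth - 1)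
    else if char = ',' ∧ depth = 0 then (result ++ [String.ofList (PySem.Chars.strip current)], [], depth)
    else (result, current ++ [char], depth)

-- A's trailing 'if current: result.append("".join(current).strip())'
def finishA (st : List String × List Char × Int) : List String :=
  match st with
  | (result, current, _) => if current = [] then result else result ++ [String.ofList (PySem.Chars.strip current)]

def split_union_args_py (args_str : String) : List String :=
  finishA (args_str.toList.foldl stepA ([], [], 0))

-- ===== PORT B =====
-- B helper: index of the first comma at bracket depth 0 (depth d at the start), None if there is none
def topCommaIdx : List Char → Int → Option Nat
  | [], _ => none
  | c :: rest, d =>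
    if c = '[' then (topCommaIdx rest (d + 1)).map (· + 1)
    else if c = ']' then (topCommaIdx rest (d - 1)).map (· + 1)
    else if c = ',' ∧ d = 0 then some 0
    else (topCommaIdx rest d).map (· + 1)

-- termination fact for splitB, cited by name in decreasing_by
theorem topCommaIdx_lt : ∀ (s : List Char) (d : Int) (i : Nat), topCommaIdx s d = some i → i < s.length := by
  intro s
  induction s with
  | nil => intro d i h; simp [topCommaIdx] at h
  | cons c rest ih =>
    intro d i h
    simp only [topCommaIdx] at h
    split_ifs at h with h1 h2 h3
    · rcases Option.map_eq_some_iff.mp h with ⟨j, hj, rfl⟩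
      have := ih _ _ hj; simp; omega
    · rcases Option.map_eq_some_iff.mp h with ⟨j, hj, rfl⟩
      have := ih _ _ hj; simp; omega
    · cases h; simp
    · rcases Option.map_eq_some_iff.mp h with ⟨j, hj, rfl⟩
      have := ih _ _ hj; simp; omega

-- B: split at the first top-level comma and recurse (slices args_str[:i] / args_str[i+1:] are take/drop: 0 ≤ i < len)
def splitB (s : List Char) : List String :=
  match h : topCommaIdx s 0 with
  | none => if s = [] then [] else [String.ofList (PySem.Chars.strip s)]
  | some i => String.ofList (PySem.Chars.strip (s.take i)) :: splitB (s.drop (i + 1))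
termination_by s.length
decreasing_by
  have := topCommaIdx_lt s 0 i h
  simp; omega

def split_union_args_py_alt (args_str : String) : List String :=
  splitB args_str.toList

-- ===== PRECONDITION & SPEC =====
def Spec_split_union_args_py (args_str : String) (out : List String) : Prop := out = split_union_args_py_alt args_str
instance (args_str : String) (out : List String) : Decidable (Spec_split_union_args_py args_str out) := by unfold Spec_split_union_args_py; infer_instance

-- ===== CLAIM (what is proved, stated in full; the proofs are below) =====
def Claim_equal_split_union_args_py : Prop := ∀ (args_str : String), Dom_split_union_args_py args_str → Spec_split_union_args_py args_str (split_union_args_py args_str)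

-- ===== LEMMAS AND PROOFS =====

-- reference splitting function: raw (unstripped) top-level segments of s, buffer cur, depth d
def segs : List Char → Int → List Char → List (List Char)
  | cur, _, [] => if cur = [] then [] else [cur]
  | cur, d, c :: rest =>
    if c = '[' then segs (cur ++ [c]) (d + 1) rest
    else if c = ']' then segs (cur ++ [c]) (d - 1) rest
    else if c = ',' ∧ d = 0 then cur :: segs [] 0 rest
    else segs (cur ++ [c]) d rest

def mkstrip (cs : List Char) : String := String.ofList (PySem.Chars.strip cs)

theorem loopA_eq : ∀ (s : List Char) (res : List String) (cur : List Char) (d : Int),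
    finishA (s.foldl stepA (res, cur, d)) = res ++ (segs cur d s).map mkstrip := by
  intro s
  induction s with
  | nil => intro res cur d; by_cases h : cur = [] <;> simp [finishA, segs, mkstrip, h]
  | cons c rest ih =>
    intro res cur d
    simp only [List.foldl_cons, stepA, segs]
    split_ifs with h1 h2 h3
    · exact ih _ _ _
    · exact ih _ _ _
    · obtain ⟨hc, hd⟩ := h3
      subst hd
      rw [ih]
      simp [mkstrip]
    · exact ih _ _ _

theorem segs_char : ∀ (s : List Char) (cur : List Char) (d : Int),
    segs cur d s = match topCommaIdx s d with
      | some i => (cur ++ s.take i) :: segs [] 0 (s.drop (i + 1))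
      | none => if cur ++ s = [] then [] else [cur ++ s] := by
  intro s
  induction s with
  | nil => intro cur d; simp [segs, topCommaIdx]
  | cons c rest ih =>
    intro cur d
    have hne : ¬ (cur ++ c :: rest = []) := by simp
    simp only [segs, topCommaIdx, if_neg hne]
    split_ifs with h1 h2 h3
    · rw [ih]
      cases h : topCommaIdx rest (d + 1) <;>
        simp [h, List.append_assoc, List.take_succ_cons, List.drop_succ_cons]
    · rw [ih]
      cases h : topCommaIdx rest (d - 1) <;>
        simp [h, List.append_assoc, List.take_succ_cons, List.drop_succ_cons]
    · simp
    · rw [ih]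
      cases h : topCommaIdx rest d <;>
        simp [h, List.append_assoc, List.take_succ_cons, List.drop_succ_cons]

theorem splitB_eq : ∀ (n : Nat) (s : List Char), s.length ≤ n → splitB s = (segs [] 0 s).map mkstrip := by
  intro n
  induction n with
  | zero =>
    intro s hs
    have hs0 : s = [] := by cases s <;> simp_all
    subst hs0
    rw [splitB.eq_def]
    simp [topCommaIdx, segs]
  | succ n ih =>
    intro s hs
    rw [splitB.eq_def, segs_char]
    split <;> rename_i h <;> rw [h]
    · by_cases hs0 : s = [] <;> simp [hs0, mkstrip]
    · rename_i i
      have hlt := topCommaIdx_lt s 0 i h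
      have hlen : (s.drop (i + 1)).length ≤ n := by simp; omega
      simp [ih _ hlen, mkstrip]

-- ===== VERDICT (by name: the statement is the Claim_ definition above) =====
theorem split_union_args_py_spec : Claim_equal_split_union_args_py := by
  intro args_str _
  unfold Spec_split_union_args_py split_union_args_py split_union_args_py_alt
  rw [loopA_eq, splitB_eq args_str.toList.length _ le_rfl, List.nil_append]
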